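-- pv_equiv track=rewrite | github.com/kylew1004/algorithm | Baekjoon/누적합/2632.py | get_prefix_sum
-- ===== SOURCE A (Python) =====
-- def get_prefix_sum(case, arr, length):
--     for i in range(length):
--         prefix = arr[i]
--         case[prefix] = case.get(prefix, 0) + 1
--         for j in range(1, length - 1):
--             prefix += arr[(i + j) % length]
--             case[prefix] = case.get(prefix, 0) + 1
--     case[sum(arr)] = 1
--
--     return case
-- ===== SOURCE B (Python) =====
-- def get_prefix_sum(case, arr, length):
--     # prefix-sum table over the doubled (circular) sequence; mutates `case` in place like the original
--     dbl = arr[:length] + arr[:length]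
--     P = [0]
--     s = 0
--     for x in dbl:
--         s += x
--         P.append(s)
--     for i in range(length):
--         base = P[i]
--         key = P[i + 1] - base
--         case[key] = case.get(key, 0) + 1
--         for l in range(2, length):
--             key = P[i + l] - base
--             case[key] = case.get(key, 0) + 1
--     case[sum(arr)] = 1
--     return case
-- ===== Notes on version B (the rewrite author's own statement) =====
-- stated objective: alternative
-- what changed: B precomputes a prefix-sum table over the doubled sequence arr[:length]*2 and reads each circular segment sum off as a difference of two table entries, instead of A's running accumulator with a modular index lookup on every inner step.
import Mathlib
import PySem

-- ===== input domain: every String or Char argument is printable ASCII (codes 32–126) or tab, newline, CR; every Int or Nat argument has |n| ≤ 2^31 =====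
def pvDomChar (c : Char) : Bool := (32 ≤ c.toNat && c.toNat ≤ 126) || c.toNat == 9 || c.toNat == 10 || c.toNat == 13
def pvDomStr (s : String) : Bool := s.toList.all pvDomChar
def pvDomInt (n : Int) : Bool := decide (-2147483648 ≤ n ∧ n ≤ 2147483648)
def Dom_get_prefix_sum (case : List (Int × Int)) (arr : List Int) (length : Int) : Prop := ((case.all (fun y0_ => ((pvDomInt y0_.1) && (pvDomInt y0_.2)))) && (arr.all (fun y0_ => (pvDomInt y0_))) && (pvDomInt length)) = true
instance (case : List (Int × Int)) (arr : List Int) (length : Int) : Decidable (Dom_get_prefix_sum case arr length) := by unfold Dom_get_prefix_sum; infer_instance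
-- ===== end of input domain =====

-- B replaces A's running circular-sum accumulator (modular indexing on every step) by a precomputed
-- prefix-sum table over the doubled sequence, reading each segment sum off as a difference of two
-- table entries (objective: alternative). Both A and B mutate `case` in place in Python; B performs
-- the same mutation, and the equivalence proved here is about the returned dict.

-- ===== PORT A =====
def get_prefix_sum (case : List (Int × Int)) (arr : List Int) (length : Int) : List (Int × Int) :=
  let d := PySem.Dict.ofList case
  let d := (PySem.List.pyRange 0 length 1).foldl (fun d i =>
    let p0 := PySem.List.pyGetD arr i 0   -- arr[i]; total form, in range under Pre_
    let d := d.insert p0 (d.getD p0 0 + 1)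
    let pd := (PySem.List.pyRange 1 (length - 1) 1).foldl
      (fun (pd : Int × PySem.Dict Int Int) j =>
        let p := pd.1 + PySem.List.pyGetD arr (PySem.Int.mod (i + j) length) 0
        (p, pd.2.insert p (pd.2.getD p 0 + 1)))
      (p0, d)
    pd.2) d
  (d.insert arr.sum 1).items

-- ===== PORT B =====
def get_prefix_sum_alt (case : List (Int × Int)) (arr : List Int) (length : Int) : List (Int × Int) :=
  let d0 := PySem.Dict.ofList case
  let dbl := PySem.List.slice arr none (some length) ++ PySem.List.slice arr none (some length)
  let P := (dbl.foldl (fun (sp : Int × List Int) x => (sp.1 + x, sp.2 ++ [sp.1 + x])) (0, ([0] : List Int))).2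
  let d := (PySem.List.pyRange 0 length 1).foldl (fun d i =>
    let base := PySem.List.pyGetD P i 0
    let k1 := PySem.List.pyGetD P (i + 1) 0 - base
    let d := d.insert k1 (d.getD k1 0 + 1)
    (PySem.List.pyRange 2 length 1).foldl (fun d l =>
      let k := PySem.List.pyGetD P (i + l) 0 - base
      d.insert k (d.getD k 0 + 1)) d) d0
  (d.insert arr.sum 1).items

-- ===== PRECONDITION & SPEC =====
-- Pre_ excludes exactly the inputs where A raises IndexError: length > len(arr)
-- (A reads arr[i] and arr[(i+j) % length] for indices up to length-1).
def Pre_get_prefix_sum (case : List (Int × Int)) (arr : List Int) (length : Int) : Prop :=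
  0 < length → length ≤ (arr.length : Int)
instance (case : List (Int × Int)) (arr : List Int) (length : Int) : Decidable (Pre_get_prefix_sum case arr length) := by unfold Pre_get_prefix_sum; infer_instance

def pvWitness_get_prefix_sum : (List (Int × Int)) × List Int × Int := ([(3, 1)], [1, 2, 4], 3)

def Spec_get_prefix_sum (case : List (Int × Int)) (arr : List Int) (length : Int) (out : List (Int × Int)) : Prop := out = get_prefix_sum_alt case arr length
instance (case : List (Int × Int)) (arr : List Int) (length : Int) (out : List (Int × Int)) : Decidable (Spec_get_prefix_sum case arr length out) := by unfold Spec_get_prefix_sum; infer_instance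

-- ===== CLAIM (what is proved, stated in full; the proofs are below) =====
def Claim_equal_get_prefix_sum : Prop := ∀ (case : List (Int × Int)) (arr : List Int) (length : Int), Dom_get_prefix_sum case arr length → Pre_get_prefix_sum case arr length → Spec_get_prefix_sum case arr length (get_prefix_sum case arr length)

-- ===== LEMMAS AND PROOFS =====

-- Proof-side names for B's doubled list, its prefix table, and the common counting insert.
def pvDbl (arr : List Int) (L : Int) : List Int :=
  PySem.List.slice arr none (some L) ++ PySem.List.slice arr none (some L)
def pvP (arr : List Int) (L : Int) : List Int :=
  ((pvDbl arr L).foldl (fun (sp : Int × List Int) x => (sp.1 + x, sp.2 ++ [sp.1 + x])) (0, ([0] : List Int))).2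
def pvIns (d : PySem.Dict Int Int) (p : Int) : PySem.Dict Int Int := d.insert p (d.getD p 0 + 1)

-- B's prefix-building fold, characterised.
theorem pv_buildP (l : List Int) : ∀ (s : Int) (acc : List Int),
    l.foldl (fun (sp : Int × List Int) x => (sp.1 + x, sp.2 ++ [sp.1 + x])) (s, acc)
      = (s + l.sum, acc ++ (List.range l.length).map (fun k => s + (l.take (k+1)).sum)) := by
  induction l with
  | nil => intro s acc; simp
  | cons x xs ih =>
      intro s acc
      simp only [List.foldl_cons, ih (s + x) (acc ++ [s + x]), List.sum_cons,
        List.length_cons, List.range_succ_eq_map, List.map_cons, List.map_map, Prod.mk.injEq]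
      refine ⟨by ring, ?_⟩
      rw [List.append_assoc]
      congr 1
      simp only [List.singleton_append, Function.comp_def, List.take_succ_cons, List.sum_cons,
        List.take_zero]
      congr 1
      · simp
      · apply List.map_congr_left
        intro k _
        ring

-- The table entry P[t] is the sum of the first t elements of the doubled list.
theorem pv_P_get (arr : List Int) (L : Int) (t : Nat) (ht : t ≤ (pvDbl arr L).length) :
    PySem.List.pyGetD (pvP arr L) (t : Int) 0 = ((pvDbl arr L).take t).sum := by
  unfold pvP
  rw [pv_buildP, PySem.List.pyGetD_natCast]
  cases t with
  | zero => simp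
  | succ m =>
      have hm : m < (pvDbl arr L).length := by omega
      simp [List.getD, hm]

theorem pv_dbl_len (arr : List Int) (L : Int) (hL : 0 ≤ L) (hlen : L ≤ (arr.length : Int)) :
    (pvDbl arr L).length = 2 * L.toNat := by
  unfold pvDbl
  rw [PySem.List.slice_to arr hL]
  simp
  omega

-- One step of the segment sum: adding dbl[t] is adding arr[t % length].
theorem pv_step (arr : List Int) (L : Int) (hL : 0 < L) (hlen : L ≤ (arr.length : Int))
    (t : Nat) (ht : t < 2 * L.toNat) :
    ((pvDbl arr L).take (t+1)).sum
      = ((pvDbl arr L).take t).sum + PySem.List.pyGetD arr (PySem.Int.mod (t : Int) L) 0 := by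
  have hLn : L = (L.toNat : Int) := by omega
  have hlenn : L.toNat ≤ arr.length := by omega
  have hT : (PySem.List.slice arr none (some L)) = arr.take L.toNat :=
    PySem.List.slice_to arr (by omega)
  have hTlen : (arr.take L.toNat).length = L.toNat := by simp [hlenn]
  have hdlen : t < ((arr.take L.toNat) ++ (arr.take L.toNat)).length := by
    simp [hTlen]; omega
  unfold pvDbl
  rw [hT, List.take_add_one, List.getElem?_eq_getElem hdlen]
  have hmod : PySem.Int.mod (t : Int) L = ((t % L.toNat : Nat) : Int) := by
    rw [hLn]; exact PySem.Int.mod_natCast t L.toNat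
  have hmlt : t % L.toNat < arr.length := by
    have := Nat.mod_lt t (by omega : 0 < L.toNat); omega
  have helem : ((arr.take L.toNat) ++ (arr.take L.toNat))[t]'hdlen = arr[t % L.toNat]'hmlt := by
    by_cases hc : t < L.toNat
    · rw [List.getElem_append_left (by omega)]
      simp [List.getElem_take, Nat.mod_eq_of_lt hc]
    · rw [List.getElem_append_right (by simpa [hTlen] using hc)]
      have : t % L.toNat = t - L.toNat := by
        rw [Nat.mod_eq_sub_mod (by omega), Nat.mod_eq_of_lt (by omega)]
      simp [List.getElem_take, hTlen, this]
  rw [hmod, PySem.List.pyGetD_natCast]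
  simp [helem, List.getD, List.getElem?_eq_getElem hmlt]

-- Consecutive table entries differ by arr[t % length].
theorem pv_diff (arr : List Int) (L : Int) (hL : 0 < L) (hlen : L ≤ (arr.length : Int))
    (t : Int) (h0 : 0 ≤ t) (ht : t < 2 * L) :
    PySem.List.pyGetD (pvP arr L) (t + 1) 0 - PySem.List.pyGetD (pvP arr L) t 0
      = PySem.List.pyGetD arr (PySem.Int.mod t L) 0 := by
  have h1 : t = ((t.toNat : Nat) : Int) := by omega
  have hlen2 : (pvDbl arr L).length = 2 * L.toNat := pv_dbl_len arr L (by omega) hlen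
  have ht2 : t.toNat < 2 * L.toNat := by omega
  have e1 : PySem.List.pyGetD (pvP arr L) t 0 = ((pvDbl arr L).take t.toNat).sum := by
    rw [h1]; exact pv_P_get arr L t.toNat (by omega)
  have e2 : PySem.List.pyGetD (pvP arr L) (t + 1) 0 = ((pvDbl arr L).take (t.toNat + 1)).sum := by
    have h2 : t + 1 = ((t.toNat + 1 : Nat) : Int) := by omega
    rw [h2]; exact pv_P_get arr L (t.toNat + 1) (by omega)
  rw [e1, e2, pv_step arr L hL hlen t.toNat ht2, ← h1]
  ring

theorem pv_mod_small (i L : Int) (h0 : 0 ≤ i) (hiL : i < L) : PySem.Int.mod i L = i := by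
  rw [PySem.Int.mod_eq_emod_of_pos (by omega)]
  exact Int.emod_eq_of_lt h0 hiL

-- Abstract inner-loop correspondence: A's running-accumulator fold over range(j, e)
-- equals B's keyed fold over range(j+1, e+1), for any key function K with the step property.
theorem pv_foldAB {D : Type} (g : D → Int → D) (f K : Int → Int) (e : Int)
    (hK : ∀ j, 1 ≤ j → j < e → K (j+1) = K j + f j) :
    ∀ (n : Nat) (j : Int), 1 ≤ j → e - j ≤ (n : Int) → ∀ (d : D),
    ((PySem.List.pyRange j e 1).foldl
        (fun (pd : Int × D) jj => (pd.1 + f jj, g pd.2 (pd.1 + f jj))) (K j, d)).2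
      = (PySem.List.pyRange (j+1) (e+1) 1).foldl (fun d l => g d (K l)) d := by
  intro n
  induction n with
  | zero =>
      intro j hj hn d
      rw [PySem.List.pyRange_one_eq_nil (by omega), PySem.List.pyRange_one_eq_nil (by omega)]
      rfl
  | succ m ih =>
      intro j hj hn d
      by_cases hje : j < e
      · rw [PySem.List.pyRange_one_cons hje, PySem.List.pyRange_one_cons (by omega : j + 1 < e + 1)]
        simp only [List.foldl_cons]
        rw [← hK j hj hje]
        exact ih (j+1) (by omega) (by omega) (g d (K (j+1)))
      · rw [PySem.List.pyRange_one_eq_nil (by omega), PySem.List.pyRange_one_eq_nil (by omega)]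
        rfl

-- The two per-start loop bodies agree.
theorem pv_body (arr : List Int) (L : Int) (hL : 0 < L) (hlen : L ≤ (arr.length : Int))
    (d : PySem.Dict Int Int) (i : Int) (hi0 : 0 ≤ i) (hiL : i < L) :
    ((PySem.List.pyRange 1 (L - 1) 1).foldl
        (fun (pd : Int × PySem.Dict Int Int) j =>
          (pd.1 + PySem.List.pyGetD arr (PySem.Int.mod (i + j) L) 0,
           pvIns pd.2 (pd.1 + PySem.List.pyGetD arr (PySem.Int.mod (i + j) L) 0)))
        (PySem.List.pyGetD arr i 0, pvIns d (PySem.List.pyGetD arr i 0))).2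
      = (PySem.List.pyRange 2 L 1).foldl
          (fun d l => pvIns d (PySem.List.pyGetD (pvP arr L) (i + l) 0 - PySem.List.pyGetD (pvP arr L) i 0))
          (pvIns d (PySem.List.pyGetD (pvP arr L) (i + 1) 0 - PySem.List.pyGetD (pvP arr L) i 0)) := by
  have hK : ∀ j, 1 ≤ j → j < L - 1 →
      (PySem.List.pyGetD (pvP arr L) (i + (j + 1)) 0 - PySem.List.pyGetD (pvP arr L) i 0)
        = (PySem.List.pyGetD (pvP arr L) (i + j) 0 - PySem.List.pyGetD (pvP arr L) i 0)
          + PySem.List.pyGetD arr (PySem.Int.mod (i + j) L) 0 := by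
    intro j hj hjl
    have := pv_diff arr L hL hlen (i + j) (by omega) (by omega)
    have harr : i + (j + 1) = i + j + 1 := by ring
    rw [harr]
    omega
  have hbase : PySem.List.pyGetD arr i 0
      = PySem.List.pyGetD (pvP arr L) (i + 1) 0 - PySem.List.pyGetD (pvP arr L) i 0 := by
    rw [pv_diff arr L hL hlen i hi0 (by omega), pv_mod_small i L hi0 hiL]
  have h := pv_foldAB (D := PySem.Dict Int Int) pvIns
      (fun j => PySem.List.pyGetD arr (PySem.Int.mod (i + j) L) 0)
      (fun j => PySem.List.pyGetD (pvP arr L) (i + j) 0 - PySem.List.pyGetD (pvP arr L) i 0)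
      (L - 1) (fun j hj hjl => hK j hj hjl)
      (L - 2).toNat 1 (by norm_num) (by omega)
      (pvIns d (PySem.List.pyGetD (pvP arr L) (i + 1) 0 - PySem.List.pyGetD (pvP arr L) i 0))
  rw [hbase]
  have e2 : L - 1 + 1 = L := by ring
  have e1 : (1 : Int) + 1 = 2 := by norm_num
  rw [e2, e1] at h
  exact h

-- ===== VERDICT (by name: the statement is the Claim_ definition above) =====
theorem get_prefix_sum_spec : Claim_equal_get_prefix_sum := by
  intro case arr length hdom hpre
  unfold Spec_get_prefix_sum get_prefix_sum get_prefix_sum_alt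
  by_cases hL : 0 < length
  · have hlen : length ≤ (arr.length : Int) := hpre hL
    refine congrArg (fun d => (PySem.Dict.insert d arr.sum 1).items) ?_
    refine PySem.List.foldl_congr_mem _ _ _ _ ?_
    intro d i hi
    have hmem := (PySem.List.mem_pyRange_one).1 hi
    exact pv_body arr length hL hlen d i hmem.1 hmem.2
  · have hnil : PySem.List.pyRange 0 length 1 = [] := PySem.List.pyRange_one_eq_nil (by omega)
    rw [hnil]
    rfl
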